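-- pv_equiv track=rewrite | github.com/Tayyab-Hussayn/jarvis-assistant | core/engines/workflow/simple_workflow.py | _generate_smart_filename
-- ===== SOURCE A (Python) =====
-- def _generate_smart_filename(description: str) -> str:
--     """Generate smart filename based on description context"""
--     desc_lower = description.lower()
--
--     # Detect file type from description
--     if any(word in desc_lower for word in ['python', 'script', '.py']):
--         if 'calculator' in desc_lower:
--             return 'calculator.py'
--         elif 'data' in desc_lower and 'analysis' in desc_lower:
--             return 'data_analyzer.py'
--         elif 'hello' in desc_lower:
--             return 'hello_world.py'
--         else:
--             return 'script.py'
--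
--     elif any(word in desc_lower for word in ['html', 'website', 'page', 'web']):
--         if 'portfolio' in desc_lower:
--             return 'portfolio.html'
--         elif 'landing' in desc_lower:
--             return 'landing_page.html'
--         elif 'contact' in desc_lower:
--             return 'contact.html'
--         else:
--             return 'index.html'
--
--     elif any(word in desc_lower for word in ['css', 'style', 'stylesheet']):
--         if 'main' in desc_lower:
--             return 'styles/main.css'
--         elif 'component' in desc_lower:
--             return 'styles/components.css'
--         else:
--             return 'styles/style.css'
--
--     elif any(word in desc_lower for word in ['javascript', 'js', 'function']):
--         if 'component' in desc_lower:
--             return 'js/components.js'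
--         elif 'util' in desc_lower:
--             return 'js/utils.js'
--         else:
--             return 'js/script.js'
--
--     elif any(word in desc_lower for word in ['json', 'config', 'data']):
--         return 'data/config.json'
--
--     else:
--         return 'generated_file.txt'
-- ===== SOURCE B (Python) =====
-- _KEYWORDS = ('python', 'script', '.py', 'calculator', 'data', 'analysis', 'hello',
--              'html', 'website', 'page', 'web', 'portfolio', 'landing', 'contact',
--              'css', 'style', 'stylesheet', 'main', 'component',
--              'javascript', 'js', 'function', 'util', 'json', 'config')
--
--
-- def _generate_smart_filename(description: str) -> str:
--     d = description.lower()
--     # one scan over the text: at each position, record every keyword starting there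
--     found = set()
--     for i in range(len(d)):
--         for kw in _KEYWORDS:
--             if kw not in found and d.startswith(kw, i):
--                 found.add(kw)
--     # decide from the precomputed flags
--     if 'python' in found or 'script' in found or '.py' in found:
--         if 'calculator' in found:
--             return 'calculator.py'
--         if 'data' in found and 'analysis' in found:
--             return 'data_analyzer.py'
--         if 'hello' in found:
--             return 'hello_world.py'
--         return 'script.py'
--     if 'html' in found or 'website' in found or 'page' in found or 'web' in found:
--         if 'portfolio' in found:
--             return 'portfolio.html'
--         if 'landing' in found:
--             return 'landing_page.html'
--         if 'contact' in found:
--             return 'contact.html'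
--         return 'index.html'
--     if 'css' in found or 'style' in found or 'stylesheet' in found:
--         if 'main' in found:
--             return 'styles/main.css'
--         if 'component' in found:
--             return 'styles/components.css'
--         return 'styles/style.css'
--     if 'javascript' in found or 'js' in found or 'function' in found:
--         if 'component' in found:
--             return 'js/components.js'
--         if 'util' in found:
--             return 'js/utils.js'
--         return 'js/script.js'
--     if 'json' in found or 'config' in found or 'data' in found:
--         return 'data/config.json'
--     return 'generated_file.txt'
-- ===== Notes on version B (the rewrite author's own statement) =====
-- stated objective: alternative
-- what changed: A runs 25 independent substring searches inside an if/elif cascade; B makes one left-to-right scan of the lowered text, testing every keyword at each position and collecting a found-set, and the filename decision afterwards only reads the precomputed flags.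
import Mathlib
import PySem

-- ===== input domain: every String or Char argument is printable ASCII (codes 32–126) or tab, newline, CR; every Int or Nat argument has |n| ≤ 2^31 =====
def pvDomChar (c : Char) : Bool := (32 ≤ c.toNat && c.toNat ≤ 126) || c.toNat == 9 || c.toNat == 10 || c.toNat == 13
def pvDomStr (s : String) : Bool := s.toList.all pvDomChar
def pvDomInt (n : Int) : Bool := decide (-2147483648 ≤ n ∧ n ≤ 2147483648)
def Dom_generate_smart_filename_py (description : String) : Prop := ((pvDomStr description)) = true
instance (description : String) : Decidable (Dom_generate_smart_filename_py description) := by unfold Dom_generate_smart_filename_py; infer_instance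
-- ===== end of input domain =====

-- B replaces A's 25 independent substring searches in an if/elif cascade by one left-to-right
-- scan collecting a found-set of keywords; the decision then reads precomputed flags (objective: alternative).

-- ===== PORT A =====
def generate_smart_filename_py (description : String) : String :=
  let d := PySem.Str.lower description
  if ["python", "script", ".py"].any (fun w => PySem.Str.isIn w d) then
    if PySem.Str.isIn "calculator" d then "calculator.py"
    else if PySem.Str.isIn "data" d && PySem.Str.isIn "analysis" d then "data_analyzer.py"
    else if PySem.Str.isIn "hello" d then "hello_world.py"
    else "script.py"
  else if ["html", "website", "page", "web"].any (fun w => PySem.Str.isIn w d) then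
    if PySem.Str.isIn "portfolio" d then "portfolio.html"
    else if PySem.Str.isIn "landing" d then "landing_page.html"
    else if PySem.Str.isIn "contact" d then "contact.html"
    else "index.html"
  else if ["css", "style", "stylesheet"].any (fun w => PySem.Str.isIn w d) then
    if PySem.Str.isIn "main" d then "styles/main.css"
    else if PySem.Str.isIn "component" d then "styles/components.css"
    else "styles/style.css"
  else if ["javascript", "js", "function"].any (fun w => PySem.Str.isIn w d) then
    if PySem.Str.isIn "component" d then "js/components.js"
    else if PySem.Str.isIn "util" d then "js/utils.js"
    else "js/script.js"
  else if ["json", "config", "data"].any (fun w => PySem.Str.isIn w d) then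
    "data/config.json"
  else "generated_file.txt"

-- ===== PORT B =====
def pvKeywords : List String :=
  ["python", "script", ".py", "calculator", "data", "analysis", "hello",
   "html", "website", "page", "web", "portfolio", "landing", "contact",
   "css", "style", "stylesheet", "main", "component",
   "javascript", "js", "function", "util", "json", "config"]

-- inner loop of Source B's scan: at one position (suffix sfx of the text), try every keyword;
-- d.startswith(kw, i) is ported as kw.toList.isPrefixOf sfx, exact since sfx = d[i:].
def pvScanPos (sfx : List Char) (found : PySem.Set String) : PySem.Set String :=
  pvKeywords.foldl
    (fun acc kw => if !(PySem.Set.contains acc kw) && kw.toList.isPrefixOf sfx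
                   then PySem.Set.add acc kw else acc) found

-- outer loop of Source B's scan: position i of 'for i in range(len(d))' ported as the suffix d[i:]
def pvScan : List Char → PySem.Set String → PySem.Set String
  | [], found => found
  | c :: rest, found => pvScan rest (pvScanPos (c :: rest) found)

def generate_smart_filename_py_alt (description : String) : String :=
  let d := PySem.Str.lower description
  let found := pvScan d.toList PySem.Set.empty
  if PySem.Set.contains found "python" || PySem.Set.contains found "script" || PySem.Set.contains found ".py" then
    if PySem.Set.contains found "calculator" then "calculator.py"
    else if PySem.Set.contains found "data" && PySem.Set.contains found "analysis" then "data_analyzer.py"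
    else if PySem.Set.contains found "hello" then "hello_world.py"
    else "script.py"
  else if PySem.Set.contains found "html" || PySem.Set.contains found "website" || PySem.Set.contains found "page" || PySem.Set.contains found "web" then
    if PySem.Set.contains found "portfolio" then "portfolio.html"
    else if PySem.Set.contains found "landing" then "landing_page.html"
    else if PySem.Set.contains found "contact" then "contact.html"
    else "index.html"
  else if PySem.Set.contains found "css" || PySem.Set.contains found "style" || PySem.Set.contains found "stylesheet" then
    if PySem.Set.contains found "main" then "styles/main.css"
    else if PySem.Set.contains found "component" then "styles/components.css"
    else "styles/style.css"
  else if PySem.Set.contains found "javascript" || PySem.Set.contains found "js" || PySem.Set.contains found "function" then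
    if PySem.Set.contains found "component" then "js/components.js"
    else if PySem.Set.contains found "util" then "js/utils.js"
    else "js/script.js"
  else if PySem.Set.contains found "json" || PySem.Set.contains found "config" || PySem.Set.contains found "data" then
    "data/config.json"
  else "generated_file.txt"

-- ===== PRECONDITION & SPEC =====
def Spec_generate_smart_filename_py (description : String) (out : String) : Prop := out = generate_smart_filename_py_alt description
instance (description : String) (out : String) : Decidable (Spec_generate_smart_filename_py description out) := by unfold Spec_generate_smart_filename_py; infer_instance

-- ===== CLAIM (what is proved, stated in full; the proofs are below) =====
def Claim_equal_generate_smart_filename_py : Prop := ∀ (description : String), Dom_generate_smart_filename_py description → Spec_generate_smart_filename_py description (generate_smart_filename_py description)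

-- ===== LEMMAS AND PROOFS =====
set_option maxHeartbeats 1600000


-- 'kw occurs starting at some considered position of cs' (positions = nonempty suffixes)
def pvOccurs (kw : List Char) : List Char → Bool
  | [] => false
  | c :: rest => kw.isPrefixOf (c :: rest) || pvOccurs kw rest

theorem pv_contains_add (s : PySem.Set String) (x y : String) :
    y ∈ PySem.Set.add s x ↔ y ∈ s ∨ y = x := PySem.Set.mem_add s x y

theorem pvScanPos_mem (sfx : List Char) :
    ∀ (ks : List String) (found : PySem.Set String) (kw : String),
      kw ∈ ks.foldl (fun acc k => if !(PySem.Set.contains acc k) && k.toList.isPrefixOf sfx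
                                  then PySem.Set.add acc k else acc) found
      ↔ kw ∈ found ∨ (kw ∈ ks ∧ kw.toList.isPrefixOf sfx = true) := by
  intro ks
  induction ks with
  | nil => intro found kw; simp
  | cons k ks ih =>
      intro found kw
      rw [List.foldl_cons, ih]
      by_cases hg : (!(PySem.Set.contains found k) && k.toList.isPrefixOf sfx) = true
      · rw [if_pos hg]
        rw [Bool.and_eq_true, Bool.not_eq_true'] at hg
        rw [pv_contains_add]
        by_cases hk : kw = k
        · subst hk; simp [hg.2]
        · simp [hk]
      · rw [if_neg hg]
        rw [Bool.and_eq_true, Bool.not_eq_true'] at hg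
        rw [not_and] at hg
        by_cases hk : kw = k
        · subst hk
          by_cases hp : kw.toList.isPrefixOf sfx = true
          · have hc : PySem.Set.contains found kw ≠ false := fun h => hg h hp
            have ht : PySem.Set.contains found kw = true := by
              cases h : PySem.Set.contains found kw
              · exact absurd h hc
              · rfl
            have hmem : kw ∈ found := (PySem.Set.contains_iff _ _).mp ht
            simp [hmem]
          · simp [hp]
        · simp [hk]

theorem pvScan_mem (kw : String) (hkw : kw ∈ pvKeywords) :
    ∀ (cs : List Char) (found : PySem.Set String),
      kw ∈ pvScan cs found ↔ kw ∈ found ∨ pvOccurs kw.toList cs = true := by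
  intro cs
  induction cs with
  | nil => intro found; rw [show pvScan [] found = found from rfl]; simp [pvOccurs]
  | cons c rest ih =>
      intro found
      rw [show pvScan (c :: rest) found = pvScan rest (pvScanPos (c :: rest) found) from rfl,
        ih, pvScanPos, pvScanPos_mem]
      simp only [pvOccurs, Bool.or_eq_true]
      tauto

theorem pvOccurs_iff (kw : List Char) (hne : kw ≠ []) :
    ∀ cs : List Char, pvOccurs kw cs = true ↔ (∃ j, kw <+: cs.drop j) := by
  intro cs
  induction cs with
  | nil =>
      simp only [pvOccurs, List.drop_nil]
      constructor
      · intro h; exact absurd h (by simp)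
      · rintro ⟨j, hj⟩; exact absurd (List.prefix_nil.mp hj) hne
  | cons c rest ih =>
      simp only [pvOccurs, Bool.or_eq_true, List.isPrefixOf_iff_prefix, ih]
      constructor
      · rintro (h | ⟨j, h⟩)
        · exact ⟨0, h⟩
        · exact ⟨j + 1, by simpa using h⟩
      · rintro ⟨j, h⟩
        cases j with
        | zero => exact Or.inl h
        | succ j => exact Or.inr ⟨j, by simpa using h⟩

theorem pv_contains_eq_isIn (kw : String) (hkw : kw ∈ pvKeywords) (hne : kw.toList ≠ [])
    (d : String) :
    PySem.Set.contains (pvScan d.toList PySem.Set.empty) kw = PySem.Str.isIn kw d := by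
  rw [Bool.eq_iff_iff, PySem.Set.contains_iff, pvScan_mem kw hkw,
    pvOccurs_iff kw.toList hne, PySem.Chars.exists_prefix_drop_iff_isIn]
  simp [PySem.Set.empty]

-- ===== VERDICT (by name: the statement is the Claim_ definition above) =====
theorem generate_smart_filename_py_spec : Claim_equal_generate_smart_filename_py := by
  intro description _
  unfold Spec_generate_smart_filename_py generate_smart_filename_py generate_smart_filename_py_alt
  simp only [List.any_cons, List.any_nil, Bool.or_false]
  rw [pv_contains_eq_isIn "python" (by decide) (by decide),
    pv_contains_eq_isIn "script" (by decide) (by decide),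
    pv_contains_eq_isIn ".py" (by decide) (by decide),
    pv_contains_eq_isIn "calculator" (by decide) (by decide),
    pv_contains_eq_isIn "data" (by decide) (by decide),
    pv_contains_eq_isIn "analysis" (by decide) (by decide),
    pv_contains_eq_isIn "hello" (by decide) (by decide),
    pv_contains_eq_isIn "html" (by decide) (by decide),
    pv_contains_eq_isIn "website" (by decide) (by decide),
    pv_contains_eq_isIn "page" (by decide) (by decide),
    pv_contains_eq_isIn "web" (by decide) (by decide),
    pv_contains_eq_isIn "portfolio" (by decide) (by decide),
    pv_contains_eq_isIn "landing" (by decide) (by decide),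
    pv_contains_eq_isIn "contact" (by decide) (by decide),
    pv_contains_eq_isIn "css" (by decide) (by decide),
    pv_contains_eq_isIn "style" (by decide) (by decide),
    pv_contains_eq_isIn "stylesheet" (by decide) (by decide),
    pv_contains_eq_isIn "main" (by decide) (by decide),
    pv_contains_eq_isIn "component" (by decide) (by decide),
    pv_contains_eq_isIn "javascript" (by decide) (by decide),
    pv_contains_eq_isIn "js" (by decide) (by decide),
    pv_contains_eq_isIn "function" (by decide) (by decide),
    pv_contains_eq_isIn "util" (by decide) (by decide),
    pv_contains_eq_isIn "json" (by decide) (by decide),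
    pv_contains_eq_isIn "config" (by decide) (by decide)]
  simp only [Bool.or_assoc]
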